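-- pv_equiv track=rewrite | github.com/Numinus1/Python_Challenges | nqueens_hillclimbing/nqueens_hillclimbing.py | getSteepestMove
-- ===== SOURCE A (Python) =====
-- def checkClashes(board):
--
--     clashes = 0
--
--     #iterate over all the columns and rows:
--     for x in range(len(board)):
--         for y in range(x + 1, len(board)):
--
--             #check rows:
--             if board[x] == board[y]:
--                 clashes += 1
--
--             #check diagonals:
--             d = y - x
--             if board[x] == board[y] + d:
--                 clashes += 1
--             elif board[x] == board[y] - d:
--                 clashes += 1
--
--     return clashes
--
-- def getSteepestMove(board):
--     #save current clashes
--     currClashes = checkClashes(board)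
--     #generate variable to hold clash count and new board after each single move
--     bestClashes = currClashes
--     bestBoard = list(board)
--
--     #iterate over each column:
--     for x in range(len(board)):
--         #iterate over moving the queen in that column over each row:
--         for y in range(len(board)):
--             if y != board[x]:
--                 tboard = list(board)
--                 tboard[x] = y
--                 tclashes = checkClashes(tboard)
--                 #check if this is the most clash-reducing move to date
--                 #if it is, save it:
--                 if tclashes < bestClashes:
--                     bestBoard = list(tboard)
--                     bestClashes = tclashes
--
--         #return true to indicate the algorithm should backtrack and continue looking
--         return bestBoard
-- ===== SOURCE B (Python) =====
-- def getSteepestMove(board):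
--     v0 = board[0]
--     rows = {}
--     dplus = {}
--     dminus = {}
--     for i, r in enumerate(board[1:], 1):
--         rows[r] = rows.get(r, 0) + 1
--         dplus[r + i] = dplus.get(r + i, 0) + 1
--         dminus[r - i] = dminus.get(r - i, 0) + 1
--
--     def contrib(v):
--         return rows.get(v, 0) + dplus.get(v, 0) + dminus.get(v, 0)
--
--     best = contrib(v0)
--     besty = v0
--     for y in range(len(board)):
--         if y != v0 and contrib(y) < best:
--             best = contrib(y)
--             besty = y
--     return [besty] + board[1:]
-- ===== Notes on version B (the rewrite author's own statement) =====
-- stated objective: faster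
-- what changed: Instead of re-running the O(n^2) full-board clash count for every candidate row of the column-0 queen, B precomputes row/diagonal hit counters for columns 1..n-1 once and evaluates each candidate move in O(1); the constant clash count among columns 1..n-1 cancels out of every comparison.
-- outside the precondition, e.g. on getSteepestMove([]): A returns None, B raises IndexError
import Mathlib
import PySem

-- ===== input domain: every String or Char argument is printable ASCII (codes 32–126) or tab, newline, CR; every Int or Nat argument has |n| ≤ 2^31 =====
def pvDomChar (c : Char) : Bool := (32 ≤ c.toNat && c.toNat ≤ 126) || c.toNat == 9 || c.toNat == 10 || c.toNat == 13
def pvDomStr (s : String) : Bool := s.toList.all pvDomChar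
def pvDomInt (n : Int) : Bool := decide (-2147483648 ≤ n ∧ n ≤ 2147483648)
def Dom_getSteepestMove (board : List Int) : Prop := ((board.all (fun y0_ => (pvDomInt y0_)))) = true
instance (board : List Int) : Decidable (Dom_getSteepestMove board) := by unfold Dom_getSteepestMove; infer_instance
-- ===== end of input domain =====

-- B replaces A's per-candidate O(n^2) full-board clash recount by counters for the rows and
-- both diagonals of columns 1..n-1, built once, so each candidate row for the column-0 queen
-- is scored in O(1); objective: faster (O(n) vs O(n^3)).

-- ===== PORT A =====
def checkClashes (board : List Int) : Int :=
  (PySem.List.pyRange 0 (PySem.List.len board) 1).foldl (fun clashes x =>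
    (PySem.List.pyRange (x + 1) (PySem.List.len board) 1).foldl (fun clashes y =>
      -- board[x], board[y]: x and y are always in range here, so pyGetD is exact
      let clashes := if PySem.List.pyGetD board x 0 = PySem.List.pyGetD board y 0 then clashes + 1 else clashes
      let d := y - x
      if PySem.List.pyGetD board x 0 = PySem.List.pyGetD board y 0 + d then clashes + 1
      else if PySem.List.pyGetD board x 0 = PySem.List.pyGetD board y 0 - d then clashes + 1
      else clashes) clashes) 0

def getSteepestMove (board : List Int) : List Int :=
  let currClashes := checkClashes board
  -- the Python 'for x' loop returns at the end of its FIRST iteration (x = 0); on an empty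
  -- board it never runs and Python falls through returning None (excluded by Pre_)
  if board.length = 0 then board
  else
    ((PySem.List.pyRange 0 (PySem.List.len board) 1).foldl
      (fun (st : Int × List Int) y =>
        if y ≠ PySem.List.pyGetD board 0 0 then
          let tboard := PySem.List.pySetD board 0 y   -- tboard = list(board); tboard[0] = y (0 in range)
          let tclashes := checkClashes tboard
          if tclashes < st.1 then (tclashes, tboard) else st
        else st)
      (currClashes, board)).2

-- ===== PORT B =====
def getSteepestMove_alt (board : List Int) : List Int :=
  let v0 := PySem.List.pyGetD board 0 0   -- board[0]; IndexError on [] is outside Pre_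
  let ds := (PySem.List.enumerate (PySem.List.slice board (some 1) none) 1).foldl
      (fun (ds : PySem.Dict Int Int × PySem.Dict Int Int × PySem.Dict Int Int) p =>
        (ds.1.insert p.2 (ds.1.getD p.2 0 + 1),
         ds.2.1.insert (p.2 + p.1) (ds.2.1.getD (p.2 + p.1) 0 + 1),
         ds.2.2.insert (p.2 - p.1) (ds.2.2.getD (p.2 - p.1) 0 + 1)))
      (PySem.Dict.empty, PySem.Dict.empty, PySem.Dict.empty)
  let contrib := fun (v : Int) => ds.1.getD v 0 + ds.2.1.getD v 0 + ds.2.2.getD v 0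
  let r := (PySem.List.pyRange 0 (PySem.List.len board) 1).foldl
      (fun (st : Int × Int) y => if y ≠ v0 ∧ contrib y < st.1 then (contrib y, y) else st)
      (contrib v0, v0)
  [r.2] ++ PySem.List.slice board (some 1) none

-- ===== PRECONDITION & SPEC =====
-- Pre_ excludes only the empty board, on which A falls through its loop and returns None
-- (not a list); B raises IndexError there.
def Pre_getSteepestMove (board : List Int) : Prop := board ≠ []
instance (board : List Int) : Decidable (Pre_getSteepestMove board) := by unfold Pre_getSteepestMove; infer_instance
def pvWitness_getSteepestMove : List Int := [0]

def Spec_getSteepestMove (board : List Int) (out : List Int) : Prop := out = getSteepestMove_alt board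
instance (board : List Int) (out : List Int) : Decidable (Spec_getSteepestMove board out) := by unfold Spec_getSteepestMove; infer_instance

-- ===== CLAIM (what is proved, stated in full; the proofs are below) =====
def Claim_equal_getSteepestMove : Prop := ∀ (board : List Int), Dom_getSteepestMove board → Pre_getSteepestMove board → Spec_getSteepestMove board (getSteepestMove board)

-- ===== LEMMAS AND PROOFS =====

def pairN (b : List Int) (x y : Nat) : Int :=
  (if b.getD x 0 = b.getD y 0 then 1 else 0) +
  (if b.getD x 0 = b.getD y 0 + ((y : Int) - (x : Int)) then 1
   else if b.getD x 0 = b.getD y 0 - ((y : Int) - (x : Int)) then 1 else 0)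

def SSN (b : List Int) : Int :=
  ((List.range b.length).map (fun x =>
    ((List.range (b.length - (x + 1))).map (fun j => pairN b x (x + 1 + j))).sum)).sum

def pairI (b : List Int) (x y : Int) : Int :=
  (if PySem.List.pyGetD b x 0 = PySem.List.pyGetD b y 0 then 1 else 0) +
  (if PySem.List.pyGetD b x 0 = PySem.List.pyGetD b y 0 + (y - x) then 1
   else if PySem.List.pyGetD b x 0 = PySem.List.pyGetD b y 0 - (y - x) then 1 else 0)

theorem check_step1 (b : List Int) :
    checkClashes b =
      ((PySem.List.pyRange 0 (PySem.List.len b) 1).map (fun x =>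
        ((PySem.List.pyRange (x + 1) (PySem.List.len b) 1).map (fun y => pairI b x y)).sum)).sum := by
  unfold checkClashes
  have houter :
      (PySem.List.pyRange 0 (PySem.List.len b) 1).foldl (fun clashes x =>
        (PySem.List.pyRange (x + 1) (PySem.List.len b) 1).foldl (fun clashes y =>
          let clashes := if PySem.List.pyGetD b x 0 = PySem.List.pyGetD b y 0 then clashes + 1 else clashes
          let d := y - x
          if PySem.List.pyGetD b x 0 = PySem.List.pyGetD b y 0 + d then clashes + 1
          else if PySem.List.pyGetD b x 0 = PySem.List.pyGetD b y 0 - d then clashes + 1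
          else clashes) clashes) 0
      = (PySem.List.pyRange 0 (PySem.List.len b) 1).foldl (fun clashes x =>
          clashes + ((PySem.List.pyRange (x + 1) (PySem.List.len b) 1).map (fun y => pairI b x y)).sum) 0 := by
    apply PySem.List.foldl_congr_mem
    intro acc x _
    rw [← PySem.List.foldl_add]
    apply PySem.List.foldl_congr_mem
    intro acc' y _
    simp only [pairI]
    split_ifs <;> omega
  rw [houter, PySem.List.foldl_add, zero_add]

theorem check_eq_SSN (b : List Int) : checkClashes b = SSN b := by
  rw [check_step1, SSN]
  rw [PySem.List.pyRange_one 0 (PySem.List.len b)]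
  have hlen : ((PySem.List.len b) - 0).toNat = b.length := by
    simp [PySem.List.len_eq]
  rw [hlen, List.map_map]
  apply congrArg
  apply List.map_congr_left
  intro k hk
  simp only [List.mem_range] at hk
  simp only [Function.comp]
  -- x = 0 + ↑k
  rw [show ((0 : Int) + (k : Int)) = (k : Int) by ring]
  rw [PySem.List.pyRange_one ((k : Int) + 1) (PySem.List.len b)]
  have hlen2 : ((PySem.List.len b) - ((k : Int) + 1)).toNat = b.length - (k + 1) := by
    simp [PySem.List.len_eq]; omega
  rw [hlen2, List.map_map]
  apply congrArg
  apply List.map_congr_left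
  intro j hj
  simp only [Function.comp]
  -- pairI b ↑k (↑k + 1 + ↑j) = pairN b k (k + 1 + j)
  have hy : ((k : Int) + 1 + (j : Int)) = ((k + 1 + j : Nat) : Int) := by push_cast; ring
  rw [hy]
  simp only [pairI, pairN, PySem.List.pyGetD_natCast]

theorem SSN_cons (a : Int) (t : List Int) :
    SSN (a :: t) =
      ((List.range t.length).map (fun j => pairN (a :: t) 0 (1 + j))).sum + SSN t := by
  simp only [SSN, List.length_cons]
  rw [List.range_succ_eq_map]
  simp only [List.map_cons, List.sum_cons, List.map_map]
  congr 1
  apply congrArg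
  apply List.map_congr_left
  intro x hx
  simp only [Function.comp]
  have hl : t.length + 1 - (x.succ + 1) = t.length - (x + 1) := by omega
  rw [hl]
  apply congrArg
  apply List.map_congr_left
  intro j hj
  have e1 : x.succ + 1 + j = (x + 1 + j) + 1 := by omega
  have e2 : x.succ = x + 1 := rfl
  rw [e1, e2]
  simp only [pairN, List.getD_cons_succ]
  have : (((x + 1 + j + 1 : Nat)) : Int) - ((x + 1 : Nat) : Int) = ((x + 1 + j : Nat) : Int) - ((x : Nat) : Int) := by push_cast; ring
  rw [this]

theorem enum_map_range (F : Int → Int → Int) :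
    ∀ (t : List Int) (s : Int),
      (PySem.List.enumerate t s).map (fun p => F p.1 p.2) =
        (List.range t.length).map (fun (j : Nat) => F (s + (j : Int)) (t.getD j 0)) := by
  intro t
  induction t with
  | nil => intro s; rfl
  | cons r t ih =>
    intro s
    rw [PySem.List.enumerate_cons, List.map_cons, ih (s + 1), List.length_cons, List.range_succ_eq_map,
        List.map_cons, List.map_map]
    congr 1
    · simp
    · apply List.map_congr_left
      intro j hj
      simp only [Function.comp, List.getD_cons_succ, Nat.succ_eq_add_one]
      congr 1
      push_cast
      ring

theorem range_map_getD (t : List Int) : (List.range t.length).map (fun j => t.getD j 0) = t := by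
  apply List.ext_getElem
  · simp
  · intro i h1 h2; simp [List.getD_eq_getElem?_getD, List.getElem?_eq_getElem h2]

theorem count_eq_countP_range (t : List Int) (a : Int) :
    t.count a = (List.range t.length).countP (fun j => t.getD j 0 == a) := by
  conv_lhs => rw [← range_map_getD t]
  rw [List.count_eq_countP, List.countP_map]
  rfl

theorem col_eq_counts (a : Int) (t : List Int) :
    ((List.range t.length).map (fun j => pairN (a :: t) 0 (1 + j))).sum =
      (t.count a : Int) +
      (((PySem.List.enumerate t 1).map (fun p => p.2 + p.1)).count a : Int) +
      (((PySem.List.enumerate t 1).map (fun p => p.2 - p.1)).count a : Int) := by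
  rw [show (fun (p : Int × Int) => p.2 + p.1) = (fun p : Int × Int => (fun i v => v + i) p.1 p.2) from rfl,
      enum_map_range (fun i v => v + i) t 1]
  rw [show (fun (p : Int × Int) => p.2 - p.1) = (fun p : Int × Int => (fun i v => v - i) p.1 p.2) from rfl,
      enum_map_range (fun i v => v - i) t 1]
  have hsplit : ∀ j ∈ List.range t.length,
      pairN (a :: t) 0 (1 + j) =
        (if (t.getD j 0 == a) = true then (1:Int) else 0) +
        ((if (t.getD j 0 + (1 + (j:Int)) == a) = true then (1:Int) else 0) +
         (if (t.getD j 0 - (1 + (j:Int)) == a) = true then (1:Int) else 0)) := by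
    intro j hj
    have e : 1 + j = j + 1 := by omega
    simp only [pairN, e, List.getD_cons_succ, List.getD_cons_zero, beq_iff_eq]
    have e2 : ((j + 1 : Nat) : Int) - ((0 : Nat) : Int) = 1 + (j : Int) := by push_cast; ring
    rw [e2]
    split_ifs <;> omega
  rw [List.map_congr_left hsplit]
  rw [PySem.List.sum_map_add_int, PySem.List.sum_map_add_int]
  rw [PySem.List.sum_map_ite_one_zero, PySem.List.sum_map_ite_one_zero, PySem.List.sum_map_ite_one_zero]
  rw [count_eq_countP_range t a]
  rw [List.count_eq_countP, List.countP_map, List.count_eq_countP, List.countP_map]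
  have c1 : (List.range t.length).countP ((fun x => x == a) ∘ fun (j:Nat) => t.getD j 0 + (1 + (j:Int)))
      = (List.range t.length).countP (fun (j:Nat) => t.getD j 0 + (1 + (j:Int)) == a) := rfl
  have c2 : (List.range t.length).countP ((fun x => x == a) ∘ fun (j:Nat) => t.getD j 0 - (1 + (j:Int)))
      = (List.range t.length).countP (fun (j:Nat) => t.getD j 0 - (1 + (j:Int)) == a) := rfl
  rw [c1, c2]
  ring

theorem checkClashes_cons (a : Int) (t : List Int) :
    checkClashes (a :: t) =
      ((t.count a : Int) +
       (((PySem.List.enumerate t 1).map (fun p => p.2 + p.1)).count a : Int) +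
       (((PySem.List.enumerate t 1).map (fun p => p.2 - p.1)).count a : Int)) + checkClashes t := by
  rw [check_eq_SSN, SSN_cons, col_eq_counts, check_eq_SSN]

theorem dicts_getD (t : List Int) (v : Int) (d1 d2 d3 : PySem.Dict Int Int) :
    ((PySem.List.enumerate t 1).foldl
      (fun (ds : PySem.Dict Int Int × PySem.Dict Int Int × PySem.Dict Int Int) p =>
        (ds.1.insert p.2 (ds.1.getD p.2 0 + 1),
         ds.2.1.insert (p.2 + p.1) (ds.2.1.getD (p.2 + p.1) 0 + 1),
         ds.2.2.insert (p.2 - p.1) (ds.2.2.getD (p.2 - p.1) 0 + 1)))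
      (PySem.Dict.empty, PySem.Dict.empty, PySem.Dict.empty)) = (d1, d2, d3) →
    d1.getD v 0 = (t.count v : Int) ∧
    d2.getD v 0 = (((PySem.List.enumerate t 1).map (fun p => p.2 + p.1)).count v : Int) ∧
    d3.getD v 0 = (((PySem.List.enumerate t 1).map (fun p => p.2 - p.1)).count v : Int) := by
  rw [PySem.List.foldl_prod_mk (f := fun (d : PySem.Dict Int Int) (p : Int × Int) => d.insert p.2 (d.getD p.2 0 + 1))
        (g := fun (ds : PySem.Dict Int Int × PySem.Dict Int Int) (p : Int × Int) =>
          (ds.1.insert (p.2 + p.1) (ds.1.getD (p.2 + p.1) 0 + 1),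
           ds.2.insert (p.2 - p.1) (ds.2.getD (p.2 - p.1) 0 + 1)))]
  rw [PySem.List.foldl_prod_mk (f := fun (d : PySem.Dict Int Int) (p : Int × Int) => d.insert (p.2 + p.1) (d.getD (p.2 + p.1) 0 + 1))
        (g := fun (d : PySem.Dict Int Int) (p : Int × Int) => d.insert (p.2 - p.1) (d.getD (p.2 - p.1) 0 + 1))]
  intro h
  simp only [Prod.mk.injEq] at h
  obtain ⟨h1, h2, h3⟩ := h
  refine ⟨?_, ?_, ?_⟩
  · rw [h1.symm, ← List.foldl_map (f := fun (q : Int × Int) => q.2) (g := fun (d : PySem.Dict Int Int) x => d.insert x (d.getD x 0 + 1))]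
    rw [PySem.Dict.getD_foldl_insert_add_one]
    simp [PySem.List.map_snd_enumerate]
  · rw [h2.symm, ← List.foldl_map (f := fun (q : Int × Int) => q.2 + q.1) (g := fun (d : PySem.Dict Int Int) x => d.insert x (d.getD x 0 + 1))]
    rw [PySem.Dict.getD_foldl_insert_add_one]
    simp
  · rw [h3.symm, ← List.foldl_map (f := fun (q : Int × Int) => q.2 - q.1) (g := fun (d : PySem.Dict Int Int) x => d.insert x (d.getD x 0 + 1))]
    rw [PySem.Dict.getD_foldl_insert_add_one]
    simp


theorem loop_eq (t : List Int) (v C : Int) (f : Int → Int)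
    (hf : ∀ y : Int, checkClashes (y :: t) = f y + C) :
    ∀ (l : List Int) (c w : Int),
      (l.foldl (fun (st : Int × List Int) y =>
          if y ≠ v then
            let tboard := y :: t
            let tclashes := checkClashes tboard
            if tclashes < st.1 then (tclashes, tboard) else st
          else st) (c + C, w :: t))
      = ((l.foldl (fun (st : Int × Int) y => if y ≠ v ∧ f y < st.1 then (f y, y) else st) (c, w)).1 + C,
         (l.foldl (fun (st : Int × Int) y => if y ≠ v ∧ f y < st.1 then (f y, y) else st) (c, w)).2 :: t) := by
  intro l
  induction l with
  | nil => intro c w; rfl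
  | cons y l ih =>
    intro c w
    simp only [List.foldl_cons]
    by_cases hy : y = v
    · have h1 : (if y ≠ v then
            let tboard := y :: t
            let tclashes := checkClashes tboard
            if tclashes < (c + C, w :: t).1 then (tclashes, tboard) else (c + C, w :: t)
          else (c + C, w :: t)) = (c + C, w :: t) := by simp [hy]
      have h2 : (if y ≠ v ∧ f y < (c, w).1 then (f y, y) else (c, w)) = (c, w) := by simp [hy]
      rw [h1, h2]
      exact ih c w
    · have h1 : (if y ≠ v then
            let tboard := y :: t
            let tclashes := checkClashes tboard
            if tclashes < (c + C, w :: t).1 then (tclashes, tboard) else (c + C, w :: t)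
          else (c + C, w :: t)) = (if f y < c then (f y + C, y :: t) else (c + C, w :: t)) := by
        rw [if_pos hy]
        show (if checkClashes (y :: t) < c + C then (checkClashes (y :: t), y :: t) else (c + C, w :: t)) = _
        rw [hf y]
        by_cases hlt : f y < c
        · rw [if_pos (by omega), if_pos hlt]
        · rw [if_neg (by omega), if_neg hlt]
      have h2 : (if y ≠ v ∧ f y < (c, w).1 then (f y, y) else (c, w)) = (if f y < c then (f y, y) else (c, w)) := by
        by_cases hlt : f y < c
        · rw [if_pos ⟨hy, hlt⟩, if_pos hlt]
        · rw [if_neg (by tauto), if_neg hlt]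
      rw [h1, h2]
      by_cases hlt : f y < c
      · rw [if_pos hlt, if_pos hlt]; exact ih (f y) y
      · rw [if_neg hlt, if_neg hlt]; exact ih c w


-- ===== VERDICT (by name: the statement is the Claim_ definition above) =====
theorem getSteepestMove_spec : Claim_equal_getSteepestMove := by
  intro board _ hpre
  unfold Spec_getSteepestMove
  cases board with
  | nil => exact absurd rfl hpre
  | cons v t =>
    have hslice : PySem.List.slice (v :: t) (some 1) none = t := by
      rw [show (1 : Int) = ((1 : Nat) : Int) by simp, PySem.List.slice_from_natCast]
      rfl
    have hset : ∀ y : Int, PySem.List.pySetD (v :: t) 0 y = y :: t := by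
      intro y
      rw [PySem.List.pySetD_of_nonneg (v :: t) y (by norm_num)]
      rfl
    have hd := fun y => dicts_getD t y _ _ _ rfl
    have h1 := fun y => (hd y).1
    have h2 := fun y => (hd y).2.1
    have h3 := fun y => (hd y).2.2
    simp only [getSteepestMove, getSteepestMove_alt, hslice, hset,
      PySem.List.pyGetD_zero_cons, h1, h2, h3, List.singleton_append,
      List.length_cons, Nat.succ_ne_zero, if_false]
    rw [checkClashes_cons v t]
    rw [loop_eq t v (checkClashes t)
      (fun y => (t.count y : Int) +
        (((PySem.List.enumerate t 1).map (fun p => p.2 + p.1)).count y : Int) +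
        (((PySem.List.enumerate t 1).map (fun p => p.2 - p.1)).count y : Int))
      (fun y => checkClashes_cons y t)]
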